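-- pv_equiv track=rewrite | github.com/pypi-data/pypi-mirror-221 | packages/common-version/common_version-0.0.4-py3-none-any.whl/version/expression/base_method.py | cut_version_with_comma
-- ===== SOURCE A (Python) =====
-- def cut_version_with_comma(version_dest):
--     """
--     以,切割版本 例如 [,1.2.3),(1.2.3,],[1.3.0,]
--                     返回 ['[,1.2.3)', '(1.2.3,]', '[1.3.0,]']
--     :param version_dest:
--     :return:
--     """
--     pos = version_dest.find(",")
--     previous_pos = 0
--     count = 0
--     version_dest_list = []
--     while pos != -1:
--         count = count + 1
--         if count % 2 == 0:
--             if previous_pos == 0: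
--                 version_dest_list.append(version_dest[previous_pos:pos])
--             else:
--                 version_dest_list.append(version_dest[previous_pos + 1: pos])
--             previous_pos = pos
--         pos = version_dest.find(",", pos + 1)
--         if pos == -1 and previous_pos != 0:
--             if version_dest[previous_pos + 1:]:
--                 version_dest_list.append(version_dest[previous_pos + 1:])
--         elif pos == -1 and previous_pos == 0:
--             if version_dest[previous_pos:]:
--                 version_dest_list.append(version_dest[previous_pos:])
--     return version_dest_list
-- ===== SOURCE B (Python) =====
-- def cut_version_with_comma(version_dest):
--     commas = [i for i, c in enumerate(version_dest) if c == ","]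
--     if not commas:
--         return []
--     seps = [p for k, p in enumerate(commas) if k % 2 == 1]
--     if not seps:
--         return [version_dest]
--     parts = [version_dest[:seps[0]]]
--     for a, b in zip(seps, seps[1:]):
--         parts.append(version_dest[a + 1:b])
--     tail = version_dest[seps[-1] + 1:]
--     if tail:
--         parts.append(tail)
--     return parts
-- ===== Notes on version B (the rewrite author's own statement) =====
-- stated objective: alternative
-- what changed: Replaces the stateful while/str.find scan (parity counter, previous_pos sentinel, in-loop lookahead for the tail) with a declarative pass: collect all comma positions by one comprehension, take the odd-indexed ones as separators, and emit the slices between consecutive separators plus a non-empty tail.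
import Mathlib
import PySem

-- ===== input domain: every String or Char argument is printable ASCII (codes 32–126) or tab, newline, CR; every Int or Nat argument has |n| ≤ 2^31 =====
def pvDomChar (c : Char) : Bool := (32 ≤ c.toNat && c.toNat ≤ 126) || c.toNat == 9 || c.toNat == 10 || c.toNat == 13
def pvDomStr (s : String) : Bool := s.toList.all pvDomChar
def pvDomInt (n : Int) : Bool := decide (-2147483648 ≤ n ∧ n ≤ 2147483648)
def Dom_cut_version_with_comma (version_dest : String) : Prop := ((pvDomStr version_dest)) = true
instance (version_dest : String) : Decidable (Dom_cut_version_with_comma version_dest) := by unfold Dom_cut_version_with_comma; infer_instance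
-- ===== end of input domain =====

-- B replaces A's stateful while/str.find scan (parity counter, previous_pos sentinel, in-loop
-- lookahead) with a declarative pass: list the comma positions, take the odd-indexed ones as
-- separators, and slice between consecutive separators (objective: alternative decomposition).

-- ===== PORT A =====
-- A's string operations are ported on version_dest.toList (the PySem.Chars level); `fuel`
-- only makes the while loop total: each iteration consumes one comma, so t.length + 1 suffices.
def cutLoopA (t : List Char) : Nat → Int → Int → Int → List (List Char) → List (List Char)
  | 0, _, _, _, acc => acc
  | fuel + 1, pos, prev, count, acc =>
    if pos = -1 then acc
    else
      -- count = count + 1; even count appends the slice and moves previous_pos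
      let count := count + 1
      let st :=
        if PySem.Int.mod count 2 = 0 then
          ((acc ++ [if prev = 0 then PySem.List.slice t (some prev) (some pos)
                    else PySem.List.slice t (some (prev + 1)) (some pos)]), pos)
        else (acc, prev)
      -- pos = version_dest.find(",", pos + 1)
      let pos := PySem.Chars.findFrom t [','] (pos + 1) none
      let acc :=
        if pos = -1 ∧ st.2 ≠ 0 then
          (if PySem.List.slice t (some (st.2 + 1)) none ≠ [] then
             st.1 ++ [PySem.List.slice t (some (st.2 + 1)) none] else st.1)
        else if pos = -1 ∧ st.2 = 0 then
          (if PySem.List.slice t (some st.2) none ≠ [] then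
             st.1 ++ [PySem.List.slice t (some st.2) none] else st.1)
        else st.1
      cutLoopA t fuel pos st.2 count acc

def cut_version_with_comma (version_dest : String) : List String :=
  let t := version_dest.toList
  (cutLoopA t (t.length + 1) (PySem.Chars.find t [',']) 0 0 []).map String.ofList

-- ===== PORT B =====
def cut_version_with_comma_alt (version_dest : String) : List String :=
  let t := version_dest.toList
  -- commas = [i for i, c in enumerate(version_dest) if c == ","]
  let commas : List Int := ((PySem.List.enumerate t 0).filter (fun ic => ic.2 == ',')).map (·.1)
  match commas with
  | [] => []
  | _ :: _ =>
    -- seps = [p for k, p in enumerate(commas) if k % 2 == 1]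
    match (((PySem.List.enumerate commas 0).filter
              (fun kp => PySem.Int.mod kp.1 2 == 1)).map (·.2) : List Int) with
    | [] => [version_dest]
    | s0 :: rest =>
      let seps := s0 :: rest
      let parts := [PySem.List.slice t none (some s0)]
      let parts := parts ++ (seps.zip seps.tail).map
        (fun ab => PySem.List.slice t (some (ab.1 + 1)) (some ab.2))
      let tl := PySem.List.slice t (some (seps.getLast (List.cons_ne_nil s0 rest) + 1)) none
      let parts := if tl = [] then parts else parts ++ [tl]
      parts.map String.ofList

-- ===== PRECONDITION & SPEC =====
def Spec_cut_version_with_comma (version_dest : String) (out : List String) : Prop := out = cut_version_with_comma_alt version_dest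
instance (version_dest : String) (out : List String) : Decidable (Spec_cut_version_with_comma version_dest out) := by unfold Spec_cut_version_with_comma; infer_instance

-- ===== CLAIM (what is proved, stated in full; the proofs are below) =====
def Claim_equal_cut_version_with_comma : Prop := ∀ (version_dest : String), Dom_cut_version_with_comma version_dest → Spec_cut_version_with_comma version_dest (cut_version_with_comma version_dest)

-- ===== LEMMAS AND PROOFS =====

-- the (sorted) list of comma positions of t that are ≥ k
def csFrom (t : List Char) (k : Nat) : List Nat :=
  if h : k < t.length then
    (if t[k] = ',' then k :: csFrom t (k + 1) else csFrom t (k + 1))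
  else []
termination_by t.length - k

def headOr : List Nat → Int
  | [] => -1
  | p :: _ => (p : Int)

-- A's loop with the find-scan abstracted into the list of remaining comma positions
def absA (t : List Char) : List Nat → Int → Int → List (List Char) → List (List Char)
  | [], _, _, acc => acc
  | p :: rest, prev, count, acc =>
    let count := count + 1
    let st :=
      if PySem.Int.mod count 2 = 0 then
        ((acc ++ [if prev = 0 then PySem.List.slice t (some prev) (some (p : Int))
                  else PySem.List.slice t (some (prev + 1)) (some (p : Int))]), (p : Int))
      else (acc, prev)
    let acc :=
      match rest with
      | [] =>
        if st.2 ≠ 0 then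
          (if PySem.List.slice t (some (st.2 + 1)) none ≠ [] then
             st.1 ++ [PySem.List.slice t (some (st.2 + 1)) none] else st.1)
        else
          (if PySem.List.slice t (some st.2) none ≠ [] then
             st.1 ++ [PySem.List.slice t (some st.2) none] else st.1)
      | _ :: _ => st.1
    absA t rest st.2 count acc
def tailIf (t : List Char) (p : Nat) : List (List Char) :=
  if PySem.List.slice t (some ((p : Int) + 1)) none = [] then []
  else [PySem.List.slice t (some ((p : Int) + 1)) none]

def MM (t : List Char) : Bool → Nat → List Nat → List (List Char)
  | _, _, [] => []
  | true, prev, _ :: r =>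
    (match r with
     | [] => tailIf t prev
     | _ :: _ => MM t false prev r)
  | false, prev, b :: r =>
    PySem.List.slice t (some ((prev : Int) + 1)) (some (b : Int)) ::
      (match r with
       | [] => tailIf t b
       | _ :: _ => MM t true b r)

def oddIdx : List Nat → List Nat
  | [] => []
  | [_] => []
  | _ :: b :: r => b :: oddIdx r

def Bmid (t : List Char) (s0 : Nat) (os : List Nat) : List (List Char) :=
  (((s0 :: os).zip os).map
      (fun ab => PySem.List.slice t (some ((ab.1 : Int) + 1)) (some (ab.2 : Int))))
    ++ tailIf t ((s0 :: os).getLast (List.cons_ne_nil _ _))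

lemma mem_csFrom (t : List Char) (k i : Nat) :
    i ∈ csFrom t k ↔ k ≤ i ∧ i < t.length ∧ t[i]? = some ',' := by
  fun_induction csFrom t k with
  | case1 k h hc ih =>
    simp only [List.mem_cons, ih]
    constructor
    · rintro (rfl | ⟨h1, h2, h3⟩)
      · exact ⟨le_refl _, h, by simp [List.getElem?_eq_getElem h, hc]⟩
      · exact ⟨by omega, h2, h3⟩
    · rintro ⟨h1, h2, h3⟩
      by_cases hik : i = k
      · exact Or.inl hik
      · exact Or.inr ⟨by omega, h2, h3⟩
  | case2 k h hc ih =>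
    rw [ih]
    constructor
    · rintro ⟨h1, h2, h3⟩; exact ⟨by omega, h2, h3⟩
    · rintro ⟨h1, h2, h3⟩
      refine ⟨?_, h2, h3⟩
      rcases Nat.lt_or_ge k i with h' | h'
      · omega
      · exfalso; have : i = k := by omega
        subst this
        rw [List.getElem?_eq_getElem h] at h3
        simp at h3; exact hc h3
  | case3 k h =>
    simp; intro h1 h2; omega

lemma csFrom_step (t : List Char) (k p : Nat) (rest : List Nat)
    (h : csFrom t k = p :: rest) : rest = csFrom t (p + 1) := by
  fun_induction csFrom t k with
  | case1 k hk hc ih =>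
    obtain ⟨rfl, hr⟩ := by simpa using h
    exact hr.symm
  | case2 k hk hc ih =>
    exact ih h
  | case3 k hk => simp at h

lemma length_csFrom_le (t : List Char) (k : Nat) : (csFrom t k).length ≤ t.length - k := by
  fun_induction csFrom t k with
  | case1 k hk hc ih => simp; omega
  | case2 k hk hc ih => omega
  | case3 k hk => simp

lemma singleton_prefix_head? (c : Char) (l : List Char) : [c] <+: l ↔ l.head? = some c := by
  cases l <;> simp [List.cons_prefix_cons, eq_comm]

lemma ff_headOr (t : List Char) (k : Nat) (hk : k ≤ t.length) :
    PySem.Chars.findFrom t [','] (k : Int) none = headOr (csFrom t k) := by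
  cases hC : csFrom t k with
  | nil =>
    rw [headOr, PySem.Chars.findFrom_natCast_eq_neg_one_iff t [','] k hk,
        List.singleton_infix_iff]
    intro hmem
    obtain ⟨j, hj, hjc⟩ := List.mem_iff_getElem.mp hmem
    rw [List.getElem_drop] at hjc
    have hlen : k + j < t.length := by simp at hj; omega
    have : k + j ∈ csFrom t k := (mem_csFrom t k (k + j)).mpr
      ⟨by omega, hlen, by rw [List.getElem?_eq_getElem hlen, hjc]⟩
    rw [hC] at this; simp at this
  | cons p rest =>
    have hpmem : p ∈ csFrom t k := by rw [hC]; simp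
    obtain ⟨hkp, hplen, hpc⟩ := (mem_csFrom t k p).mp hpmem
    have hne : PySem.Chars.findFrom t [','] (k : Int) none ≠ -1 := by
      rw [Ne, PySem.Chars.findFrom_natCast_eq_neg_one_iff t [','] k hk,
          List.singleton_infix_iff]
      simp only [not_not]
      refine List.mem_iff_getElem.mpr ⟨p - k, by simp; omega, ?_⟩
      rw [List.getElem_drop]
      have hkpk : k + (p - k) = p := by omega
      rw [List.getElem?_eq_getElem hplen] at hpc
      simp only [Option.some.injEq] at hpc
      simp_rw [hkpk]
      exact hpc
    obtain ⟨h1, h2, h3⟩ := PySem.Chars.findFrom_natCast_spec t [','] k hk hne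
    have h0 : (0 : Int) ≤ PySem.Chars.findFrom t [','] (k : Int) none :=
      le_trans (by positivity) h1
    set F := PySem.Chars.findFrom t [','] (k : Int) none with hF
    have hFj : F = (F.toNat : Int) := (Int.toNat_of_nonneg h0).symm
    have hjc : t[F.toNat]? = some ',' := by
      rw [← List.head?_drop]; exact (singleton_prefix_head? _ _).mp h2
    have hjlen : F.toNat < t.length := by
      rcases List.getElem?_eq_some_iff.mp hjc with ⟨h', _⟩; exact h'
    have hkj : k ≤ F.toNat := by omega
    have hjmem : F.toNat ∈ csFrom t k := (mem_csFrom _ _ _).mpr ⟨hkj, hjlen, hjc⟩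
    have hpj : p ≤ F.toNat := by
      rw [hC] at hjmem
      rcases List.mem_cons.mp hjmem with h' | h'
      · omega
      · rw [csFrom_step t k p rest hC] at h'
        have := ((mem_csFrom t (p + 1) F.toNat).mp h').1; omega
    have hpre : [','] <+: t.drop p := (singleton_prefix_head? _ _).mpr
      (by rw [List.head?_drop]; exact hpc)
    have hjp : ¬ (p < F.toNat) := fun hlt => h3 p hkp hlt hpre
    rw [headOr, hFj]
    congr 1; omega

lemma cutLoopA_neg1 (t : List Char) (fuel : Nat) (prev count : Int) (acc : List (List Char)) :
    cutLoopA t fuel (-1) prev count acc = acc := by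
  cases fuel <;> simp [cutLoopA]

lemma cutLoopA_absA (t : List Char) (fuel : Nat) :
    ∀ (k : Nat) (prev count : Int) (acc : List (List Char)),
      k ≤ t.length → (csFrom t k).length ≤ fuel →
      cutLoopA t fuel (headOr (csFrom t k)) prev count acc = absA t (csFrom t k) prev count acc := by
  induction fuel with
  | zero =>
    intro k prev count acc hk hlen
    have h0 : csFrom t k = [] := List.length_eq_zero_iff.mp (by omega)
    rw [h0]; rfl
  | succ f ih =>
    intro k prev count acc hk hlen
    cases hC : csFrom t k with
    | nil => rw [headOr]; simp [cutLoopA, absA]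
    | cons p rest =>
      have hpmem := (mem_csFrom t k p).mp (by rw [hC]; simp)
      have hrest := csFrom_step t k p rest hC
      have hplen : p + 1 ≤ t.length := by omega
      have hcast : ((p : Int) + 1) = ((p + 1 : Nat) : Int) := by push_cast; ring
      rw [headOr, cutLoopA, if_neg (by omega : ¬ ((p : Nat) : Int) = -1)]
      simp only [hcast, ff_headOr t (p + 1) hplen, ← hrest, absA]
      set st : List (List Char) × Int :=
        if PySem.Int.mod (count + 1) 2 = 0 then
          ((acc ++ [if prev = 0 then PySem.List.slice t (some prev) (some (p : Int))
                    else PySem.List.slice t (some (prev + 1)) (some (p : Int))]), ((p : Nat) : Int))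
        else (acc, prev) with hst
      cases rest with
      | nil =>
        simp only [headOr, true_and, absA]
        rw [cutLoopA_neg1]
        by_cases h2 : st.2 = 0 <;> simp [h2]
      | cons q rest' =>
        have hq : ¬ (headOr (q :: rest') = -1) := by simp only [headOr]; omega
        simp only [hq, false_and, if_false]
        rw [hrest]
        exact ih (p + 1) _ _ _ hplen (by rw [← hrest]; rw [hC] at hlen; simpa using hlen)

lemma mod_succ_of_even (count : Int) (h : PySem.Int.mod count 2 = 0) :
    PySem.Int.mod (count + 1) 2 = 1 := by
  rw [PySem.Int.mod_eq_emod_of_pos (by norm_num : (0:Int) < 2)] at h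
  rw [PySem.Int.mod_eq_emod_of_pos (by norm_num : (0:Int) < 2)]
  omega

lemma mod_succ_of_odd (count : Int) (h : PySem.Int.mod count 2 = 1) :
    PySem.Int.mod (count + 1) 2 = 0 := by
  rw [PySem.Int.mod_eq_emod_of_pos (by norm_num : (0:Int) < 2)] at h
  rw [PySem.Int.mod_eq_emod_of_pos (by norm_num : (0:Int) < 2)]
  omega

lemma absA_MM (t : List Char) (n : Nat) :
    ∀ (rest : List Nat) (p : Nat) (count : Int) (acc : List (List Char)),
      rest.length ≤ n → p ≠ 0 → (∀ x ∈ rest, x ≠ 0) →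
      (PySem.Int.mod count 2 = 0 →
        absA t rest (p : Int) count acc = acc ++ MM t true p rest) ∧
      (PySem.Int.mod count 2 = 1 →
        absA t rest (p : Int) count acc = acc ++ MM t false p rest) := by
  induction n with
  | zero =>
    intro rest p count acc hlen hp hr0
    have : rest = [] := List.length_eq_zero_iff.mp (by omega)
    subst this
    simp [absA, MM]
  | succ n ih =>
    intro rest p count acc hlen hp hr0
    cases rest with
    | nil => simp [absA, MM]
    | cons x r =>
      have hp' : ((p : Nat) : Int) ≠ 0 := by
        simpa using hp
      have hx : x ≠ 0 := hr0 x (by simp)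
      constructor
      · intro hmod
        have h1 : PySem.Int.mod (count + 1) 2 = 1 := mod_succ_of_even count hmod
        have hne : ¬ PySem.Int.mod (count + 1) 2 = 0 := by rw [h1]; norm_num
        cases r with
        | nil =>
          simp only [absA, if_neg hne, if_pos hp', MM, absA]
          rw [tailIf]
          split
          · next hsl => simp
          · next hsl => rw [not_not] at hsl; simp [hsl]
        | cons y r' =>
          rw [absA]
          simp only [if_neg hne, MM]
          exact (ih (y :: r') p (count + 1) acc (by simpa using hlen) hp
            (fun z hz => hr0 z (by simp [hz]))).2 h1
      · intro hmod
        have h0 : PySem.Int.mod (count + 1) 2 = 0 := mod_succ_of_odd count hmod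
        have hx' : ((x : Nat) : Int) ≠ 0 := by simpa using hx
        cases r with
        | nil =>
          simp only [absA, if_pos h0, if_neg hp', if_pos hx', MM]
          rw [tailIf]
          split
          · next hsl => simp
          · next hsl => rw [not_not] at hsl; simp [hsl]
        | cons y r' =>
          rw [absA]
          simp only [if_pos h0, if_neg hp', MM]
          rw [(ih (y :: r') x (count + 1)
              (acc ++ [PySem.List.slice t (some ((p : Int) + 1)) (some (x : Int))])
              (by simpa using hlen) hx
              (fun z hz => hr0 z (by simp [hz]))).1 h0]
          simp
          cases r' <;> rfl

lemma W_Bmid (t : List Char) (r : List Nat) : ∀ (prev : Nat),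
    (match r with
     | [] => tailIf t prev
     | _ :: _ => MM t true prev r) = Bmid t prev (oddIdx r) := by
  induction r using oddIdx.induct with
  | case1 => intro prev; simp [oddIdx, Bmid]
  | case2 a => intro prev; simp [oddIdx, Bmid, MM]
  | case3 a b r ih =>
    intro prev
    simp only [oddIdx, MM]
    rw [ih b]
    simp only [Bmid]
    cases hO : oddIdx r with
    | nil => simp [List.getLast]
    | cons c os => simp [List.getLast_cons]

lemma mod2_natCast (m : Nat) : PySem.Int.mod ((m : Nat) : Int) 2 = ((m % 2 : Nat) : Int) := by
  exact_mod_cast PySem.Int.mod_natCast m 2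

lemma commas_csFrom (t : List Char) (k : Nat) (hk : k ≤ t.length) :
    ((PySem.List.enumerate (t.drop k) (k : Int)).filter (fun ic => ic.2 == ',')).map (·.1)
      = (csFrom t k).map (Nat.cast : Nat → Int) := by
  fun_induction csFrom t k with
  | case1 k h hc ih =>
    rw [List.drop_eq_getElem_cons h, PySem.List.enumerate_cons,
        List.filter_cons_of_pos (by simp [hc]), List.map_cons, List.map_cons]
    rw [show ((k : Int) + 1) = ((k + 1 : Nat) : Int) by push_cast; ring]
    rw [ih (by omega)]
  | case2 k h hc ih =>
    rw [List.drop_eq_getElem_cons h, PySem.List.enumerate_cons,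
        List.filter_cons_of_neg (by simp [hc])]
    rw [show ((k : Int) + 1) = ((k + 1 : Nat) : Int) by push_cast; ring]
    rw [ih (by omega)]
  | case3 k h =>
    have hd : t.drop k = [] := by simp; omega
    simp [hd]

lemma seps_oddIdx (cl : List Nat) : ∀ (n : Nat),
    ((PySem.List.enumerate (cl.map (Nat.cast : Nat → Int)) ((2 * n : Nat) : Int)).filter
        (fun kp => PySem.Int.mod kp.1 2 == 1)).map (·.2)
      = (oddIdx cl).map (Nat.cast : Nat → Int) := by
  induction cl using oddIdx.induct with
  | case1 => intro n; simp [oddIdx]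
  | case2 a =>
    intro n
    rw [List.map_cons, List.map_nil, PySem.List.enumerate_cons,
        List.filter_cons_of_neg (by rw [mod2_natCast]; simp)]
    simp [oddIdx, PySem.List.enumerate]
  | case3 a b r ih =>
    intro n
    rw [List.map_cons, List.map_cons, PySem.List.enumerate_cons, PySem.List.enumerate_cons,
        List.filter_cons_of_neg (by rw [mod2_natCast]; simp),
        List.filter_cons_of_pos (by
          rw [show (((2 * n : Nat) : Int) + 1) = ((2 * n + 1 : Nat) : Int) by push_cast; ring,
              mod2_natCast]
          simp)]
    rw [show (((2 * n : Nat) : Int) + 1 + 1) = ((2 * (n + 1) : Nat) : Int) by push_cast; ring]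
    rw [List.map_cons, ih (n + 1)]
    simp [oddIdx]

lemma getLast_map_cast (l : List Nat) (h : l ≠ []) :
    (l.map (Nat.cast : Nat → Int)).getLast (by simpa using h) = ((l.getLast h : Nat) : Int) := by
  induction l with
  | nil => exact absurd rfl h
  | cons a l ih =>
    cases l with
    | nil => rfl
    | cons b l' => simpa [List.getLast_cons] using ih (by simp)

lemma seps_oddIdx0 (cl : List Nat) :
    ((PySem.List.enumerate (cl.map (Nat.cast : Nat → Int)) 0).filter
        (fun kp => PySem.Int.mod kp.1 2 == 1)).map (·.2)
      = (oddIdx cl).map (Nat.cast : Nat → Int) := by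
  have := seps_oddIdx cl 0
  simpa using this

lemma main_eq (v : String) : cut_version_with_comma v = cut_version_with_comma_alt v := by
  simp only [cut_version_with_comma, cut_version_with_comma_alt]
  set t := v.toList with ht
  have hcom : ((PySem.List.enumerate t 0).filter (fun ic => ic.2 == ',')).map (·.1)
      = (csFrom t 0).map (Nat.cast : Nat → Int) := by
    have := commas_csFrom t 0 (by omega)
    simpa using this
  have hfind : PySem.Chars.find t [','] = headOr (csFrom t 0) := by
    rw [← PySem.Chars.findFrom_zero t [',']]
    rw [show (0 : Int) = ((0 : Nat) : Int) by simp]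
    exact ff_headOr t 0 (by omega)
  have hloop := cutLoopA_absA t (t.length + 1) 0 0 0 []
    (by omega) (by have := length_csFrom_le t 0; omega)
  rw [hfind, hloop, hcom]
  cases hC : csFrom t 0 with
  | nil => simp [absA]
  | cons c0 cr =>
    have hc0 := (mem_csFrom t 0 c0).mp (by rw [hC]; simp)
    have htne : t ≠ [] := by
      intro h0; rw [h0] at hc0; simp at hc0
    cases cr with
    | nil =>
      rw [absA]
      simp only [show PySem.Int.mod (0 + 1) 2 = 1 by decide]
      norm_num
      exact ⟨t, by simp [htne, absA], by simp [ht]⟩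
    | cons c1 r =>
      have hr1 : c1 :: r = csFrom t (c0 + 1) := csFrom_step t 0 c0 (c1 :: r) hC
      have hc1 := (mem_csFrom t (c0 + 1) c1).mp (by rw [← hr1]; simp)
      have hrr : r = csFrom t (c1 + 1) := csFrom_step t (c0 + 1) c1 r hr1.symm
      have hc1ne : c1 ≠ 0 := by omega
      have hrne : ∀ x ∈ r, x ≠ 0 := by
        intro x hx
        have := ((mem_csFrom t (c1 + 1) x).mp (by rw [← hrr]; exact hx)).1
        omega
      -- A side reduced to slice-between-separators shape
      have hA : absA t (c0 :: c1 :: r) (0 : Int) 0 []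
          = PySem.List.slice t (some 0) (some ((c1 : Nat) : Int)) :: Bmid t c1 (oddIdx r) := by
        cases r with
        | nil =>
          have hW := W_Bmid t [] c1
          simp only [oddIdx] at *
          rw [← hW]
          simp only [absA, show PySem.Int.mod (0 + 1 : Int) 2 = 1 from by decide,
            show PySem.Int.mod (0 + 1 + 1 : Int) 2 = 0 from by decide]
          norm_num [hc1ne, tailIf]
          split <;> simp
        | cons y r' =>
          have step : absA t (c0 :: c1 :: y :: r') (0 : Int) 0 []
              = absA t (y :: r') ((c1 : Nat) : Int) 2
                  [PySem.List.slice t (some 0) (some ((c1 : Nat) : Int))] := rfl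
          rw [step,
            (absA_MM t (y :: r').length (y :: r') c1 2
              [PySem.List.slice t (some 0) (some ((c1 : Nat) : Int))]
              le_rfl hc1ne hrne).1 (by decide)]
          rw [← W_Bmid t (y :: r') c1]
          simp
      rw [hA, seps_oddIdx0 (c0 :: c1 :: r)]
      simp only [oddIdx, List.map_cons, List.tail_cons]
      have hzip := List.zip_map (f := (Nat.cast : Nat → Int)) (g := (Nat.cast : Nat → Int))
        (l₁ := c1 :: oddIdx r) (l₂ := oddIdx r)
      simp only [List.map_cons] at hzip
      rw [hzip]
      have hlast := getLast_map_cast (c1 :: oddIdx r) (List.cons_ne_nil _ _)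
      simp only [List.map_cons] at hlast
      rw [hlast]
      simp only [Bmid, List.map_map]
      by_cases hE : PySem.List.slice t
          (some ((((c1 :: oddIdx r).getLast (List.cons_ne_nil _ _) : Nat) : Int) + 1)) none = [] <;>
        simp [hE, tailIf, PySem.List.slice_zero_start, Prod.map]

theorem cut_version_with_comma_spec : Claim_equal_cut_version_with_comma := by
  intro v _hdom
  unfold Spec_cut_version_with_comma
  exact main_eq v
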